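-- pv_equiv track=rewrite | github.com/fortierq/competitions | fb_hacker_cup/2021/qualification/a1_consistency.py | dp
-- ===== SOURCE A (Python) =====
-- vowels = ["A", "E", "I", "O", "U"]
--
-- def letters():
--     yield from map(chr, range(65, 65+26))
--
-- def dp(S):
--     d = {l: 0 for l in letters()}
--     for c in S:
--         for letter in letters():
--             if letter == c:
--                 continue
--             if (letter in vowels and c in vowels) or (letter not in vowels and c not in vowels):
--                 d[letter]  = d[letter] + 2
--             else:
--                 d[letter]  = d[letter] + 1
--     return min(d.values())
-- ===== SOURCE B (Python) =====
-- def dp(S):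
--     n = len(S)
--     v = 0
--     cnt = {}
--     for c in S:
--         if c in "AEIOU":
--             v += 1
--         cnt[c] = cnt.get(c, 0) + 1
--     return min(
--         2 * (v - cnt.get(ch, 0)) + (n - v) if ch in "AEIOU"
--         else 2 * (n - v - cnt.get(ch, 0)) + v
--         for ch in map(chr, range(65, 91))
--     )
-- ===== Notes on version B (the rewrite author's own statement) =====
-- stated objective: faster
-- what changed: Instead of maintaining a 26-entry cost dict and updating all 26 letters for every character of S, B makes one counting pass over S (length, vowel count, per-character counts) and computes each letter's cost by a closed-form formula.
import Mathlib
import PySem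

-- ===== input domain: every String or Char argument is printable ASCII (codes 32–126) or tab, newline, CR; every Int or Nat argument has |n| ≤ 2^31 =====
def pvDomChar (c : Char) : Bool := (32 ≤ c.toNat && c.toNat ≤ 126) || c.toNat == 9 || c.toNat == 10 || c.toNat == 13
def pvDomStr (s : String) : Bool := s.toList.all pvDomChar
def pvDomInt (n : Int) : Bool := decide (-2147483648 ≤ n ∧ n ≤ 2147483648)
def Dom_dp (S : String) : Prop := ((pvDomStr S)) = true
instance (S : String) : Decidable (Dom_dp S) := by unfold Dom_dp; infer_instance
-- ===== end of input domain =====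

-- B replaces A's 26 dict updates per character by one counting pass over S plus a
-- closed-form cost for each of the 26 letters.

-- ===== PORT A =====
def pvVowelsA : List Char := ['A', 'E', 'I', 'O', 'U']

-- letters() = map(chr, range(65, 65+26))
def pvLettersA : List Char := (PySem.List.pyRange 65 91 1).map (fun i => Char.ofNat i.toNat)

def dp (S : String) : Int :=
  let d0 : PySem.Dict Char Int :=
    pvLettersA.foldl (fun d l => d.insert l 0) PySem.Dict.empty
  let d :=
    S.toList.foldl (fun d c =>
      pvLettersA.foldl (fun d letter =>
        if letter = c then d
        else if (letter ∈ pvVowelsA ∧ c ∈ pvVowelsA) ∨ (letter ∉ pvVowelsA ∧ c ∉ pvVowelsA) then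
          d.insert letter (d.getD letter 0 + 2)
        else
          d.insert letter (d.getD letter 0 + 1)) d) d0
  -- d always holds the 26 letters, so d.values ≠ [] and Python's min never raises: getD 0 is unreachable
  (PySem.List.min? d.values (fun x => x)).getD 0

-- ===== PORT B =====
def pvVowelsB : List Char := "AEIOU".toList

def dp_alt (S : String) : Int :=
  let cs := S.toList
  let n : Int := cs.length
  let acc := cs.foldl (fun (p : Int × PySem.Dict Char Int) c =>
      ((if c ∈ pvVowelsB then p.1 + 1 else p.1), p.2.insert c (p.2.getD c 0 + 1)))
      ((0 : Int), PySem.Dict.empty)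
  let v := acc.1
  let cnt := acc.2
  -- the generator ranges over the 26 letters, so it is nonempty and min never raises: getD 0 is unreachable
  (PySem.List.min? (((PySem.List.pyRange 65 91 1).map (fun i => Char.ofNat i.toNat)).map (fun ch =>
      if ch ∈ pvVowelsB then 2 * (v - cnt.getD ch 0) + (n - v)
      else 2 * (n - v - cnt.getD ch 0) + v)) (fun x => x)).getD 0

-- ===== PRECONDITION & SPEC =====
def Spec_dp (S : String) (out : Int) : Prop := out = dp_alt S
instance (S : String) (out : Int) : Decidable (Spec_dp S out) := by unfold Spec_dp; infer_instance

-- ===== CLAIM (what is proved, stated in full; the proofs are below) =====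
def Claim_equal_dp : Prop := ∀ (S : String), Dom_dp S → Spec_dp S (dp S)

-- ===== LEMMAS AND PROOFS =====

-- cost that one character c of S adds to d[L] in A's inner loop
def pvDelta (L c : Char) : Int :=
  if L = c then 0 else if ((L ∈ pvVowelsA) ↔ (c ∈ pvVowelsA)) then 2 else 1

theorem pvVB : pvVowelsB = pvVowelsA := by decide

theorem pvLettersA_nodup : pvLettersA.Nodup := by decide

-- A's inner loop updates each present key k once, adding pvDelta k c
theorem pvInner (c : Char) :
    ∀ (ks : List Char) (done : List (Char × Int)) (g : Char → Int),
      (done.map Prod.fst ++ ks).Nodup →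
      ks.foldl (fun d letter =>
          if letter = c then d
          else if (letter ∈ pvVowelsA ∧ c ∈ pvVowelsA) ∨ (letter ∉ pvVowelsA ∧ c ∉ pvVowelsA) then
            d.insert letter (d.getD letter 0 + 2)
          else
            d.insert letter (d.getD letter 0 + 1))
        (PySem.Dict.mk (done ++ ks.map (fun k => (k, g k))))
      = PySem.Dict.mk (done ++ ks.map (fun k => (k, g k + pvDelta k c))) := by
  intro ks
  induction ks with
  | nil => intro done g h; simp
  | cons k ks ih =>
    intro done g h
    set D : PySem.Dict Char Int := PySem.Dict.mk (done ++ (k :: ks).map (fun k => (k, g k))) with hD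
    have hkeys : D.keys = done.map Prod.fst ++ k :: ks := by
      simp [hD, PySem.Dict.keys, Function.comp_def]
    have hndk : D.keys.Nodup := by rw [hkeys]; exact h
    have hkdone : ∀ p ∈ done, p.1 ≠ k := by
      intro p hp hpk
      have h1 : p.1 ∈ done.map Prod.fst := List.mem_map_of_mem hp
      exact (List.disjoint_of_nodup_append h) h1 (by simp [hpk])
    have hkks : k ∉ ks := by
      have h2 := (List.Nodup.of_append_right h)
      exact (List.nodup_cons.mp h2).1
    have hmem : (k, g k) ∈ D.items := by simp [hD]
    have hget : D.getD k 0 = g k := PySem.Dict.getD_of_mem_items D hmem hndk 0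
    have hcont : D.contains k = true := by
      rw [PySem.Dict.contains_iff_mem_keys, hkeys]; simp
    have hins : ∀ w : Int, D.insert k w =
        PySem.Dict.mk (done ++ (k, w) :: ks.map (fun k => (k, g k))) := by
      intro w
      apply PySem.Dict.ext
      rw [PySem.Dict.items_insert_of_contains D w hcont]
      have : D.items = done ++ (k, g k) :: ks.map (fun k => (k, g k)) := by simp [hD]
      rw [this]
      rw [List.map_append]
      congr 1
      · apply List.map_congr_left ?_ |>.trans (List.map_id done)
        intro p hp
        simp [hkdone p hp]
      · simp only [List.map_cons]
        congr 1
        · simp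
        · rw [List.map_map]
          apply List.map_congr_left
          intro x hx
          have : x ≠ k := fun hxk => hkks (hxk ▸ hx)
          simp [this]
    have hstep :
        (if k = c then D
         else if (k ∈ pvVowelsA ∧ c ∈ pvVowelsA) ∨ (k ∉ pvVowelsA ∧ c ∉ pvVowelsA) then
           D.insert k (D.getD k 0 + 2)
         else D.insert k (D.getD k 0 + 1))
        = PySem.Dict.mk (done ++ (k, g k + pvDelta k c) :: ks.map (fun k => (k, g k))) := by
      by_cases hkc : k = c
      · simp [hkc, pvDelta, hD]
      · by_cases hv : (k ∈ pvVowelsA ∧ c ∈ pvVowelsA) ∨ (k ∉ pvVowelsA ∧ c ∉ pvVowelsA)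
        · have : pvDelta k c = 2 := by
            simp only [pvDelta, if_neg hkc]
            rw [if_pos]; tauto
          simp only [if_neg hkc, if_pos hv, hget, hins, this]
        · have : pvDelta k c = 1 := by
            simp only [pvDelta, if_neg hkc]
            rw [if_neg]; tauto
          simp only [if_neg hkc, hget, hins, this, if_neg hv]
    rw [List.foldl_cons, hstep]
    have hre : (done ++ (k, g k + pvDelta k c) :: ks.map (fun k => (k, g k)))
        = (done ++ [(k, g k + pvDelta k c)]) ++ ks.map (fun k => (k, g k)) := by simp
    rw [hre, ih (done ++ [(k, g k + pvDelta k c)]) g (by simpa using h)]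
    simp

-- A's outer loop, starting from any value table g over the 26 letters
theorem pvOuter (cs : List Char) :
    ∀ (g : Char → Int),
      cs.foldl (fun d c =>
        pvLettersA.foldl (fun d letter =>
          if letter = c then d
          else if (letter ∈ pvVowelsA ∧ c ∈ pvVowelsA) ∨ (letter ∉ pvVowelsA ∧ c ∉ pvVowelsA) then
            d.insert letter (d.getD letter 0 + 2)
          else
            d.insert letter (d.getD letter 0 + 1)) d)
        (PySem.Dict.mk (pvLettersA.map (fun L => (L, g L))))
      = PySem.Dict.mk (pvLettersA.map (fun L => (L, g L + (cs.map (fun c => pvDelta L c)).sum))) := by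
  induction cs with
  | nil => intro g; simp
  | cons c cs ih =>
    intro g
    have h0 := pvInner c pvLettersA [] g (by simpa using pvLettersA_nodup)
    simp only [List.nil_append] at h0
    rw [List.foldl_cons, h0, ih (fun L => g L + pvDelta L c)]
    congr 1
    apply List.map_congr_left
    intro L _
    simp [add_assoc]

-- per-letter closed form of the summed deltas
theorem pvSumDelta (L : Char) (cs : List Char) :
    (cs.map (fun c => pvDelta L c)).sum =
      if L ∈ pvVowelsA then
        2 * ((cs.countP (fun c => decide (c ∈ pvVowelsA)) : Int) - (cs.count L : Int))
          + ((cs.length : Int) - (cs.countP (fun c => decide (c ∈ pvVowelsA)) : Int))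
      else
        2 * ((cs.length : Int) - (cs.countP (fun c => decide (c ∈ pvVowelsA)) : Int) - (cs.count L : Int))
          + (cs.countP (fun c => decide (c ∈ pvVowelsA)) : Int) := by
  induction cs with
  | nil => simp
  | cons c cs ih =>
    simp only [List.map_cons, List.sum_cons, List.countP_cons, List.count_cons,
      List.length_cons, ih]
    by_cases hLV : L ∈ pvVowelsA <;> by_cases hcV : c ∈ pvVowelsA <;> by_cases hLc : L = c
    all_goals simp [pvDelta, hLV, hcV, hLc]
    all_goals first
      | omega
      | (split_ifs with hx
         · exact absurd hx.symm hLc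
         · omega)

-- B's single pass is the pair of a vowel count and a character counter
theorem pvPair (cs : List Char) :
    ∀ (a : Int) (d : PySem.Dict Char Int),
      cs.foldl (fun (p : Int × PySem.Dict Char Int) c =>
          ((if c ∈ pvVowelsB then p.1 + 1 else p.1), p.2.insert c (p.2.getD c 0 + 1))) (a, d)
      = (a + (cs.countP (fun c => decide (c ∈ pvVowelsA)) : Int),
         cs.foldl (fun d c => d.insert c (d.getD c 0 + 1)) d) := by
  induction cs with
  | nil => intro a d; simp
  | cons c cs ih =>
    intro a d
    rw [List.foldl_cons, List.foldl_cons, ih]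
    by_cases hc : c ∈ pvVowelsA
    · simp [pvVB, hc]
      ring
    · simp [pvVB, hc]

-- A's initial dict {l: 0 for l in letters()}
theorem pvInit :
    pvLettersA.foldl (fun d l => d.insert l 0) PySem.Dict.empty
      = PySem.Dict.mk (pvLettersA.map (fun L => (L, (0 : Int)))) := by
  apply PySem.Dict.ext
  rw [PySem.Dict.items_foldl_insert_fresh pvLettersA (fun a => a) (fun _ => 0) PySem.Dict.empty
      (by intro a _; simp) (by simpa using pvLettersA_nodup)]
  simp [PySem.Dict.empty]

-- ===== VERDICT (by name: the statement is the Claim_ definition above) =====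
theorem dp_spec : Claim_equal_dp := by
  unfold Claim_equal_dp
  intro S _
  simp only [Spec_dp, dp, dp_alt]
  rw [pvInit]
  have houter := pvOuter S.toList (fun _ => 0)
  rw [show (pvLettersA.map (fun L => (L, (0:Int)))) =
        (pvLettersA.map (fun L => (L, (fun _ => (0:Int)) L))) from rfl,
      houter, pvPair S.toList 0 PySem.Dict.empty]
  have hlet : ((PySem.List.pyRange 65 91 1).map (fun i => Char.ofNat i.toNat)) = pvLettersA := rfl
  rw [hlet]
  simp only [PySem.Dict.values]
  congr 1
  rw [List.map_map]
  congr 1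
  apply List.map_congr_left
  intro L _
  simp only [Function.comp_apply, zero_add, pvSumDelta L S.toList, pvVB,
    PySem.Dict.getD_foldl_insert_add_one, PySem.Dict.getD_empty]
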